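-- pv_equiv track=rewrite | github.com/tnakaicode/jburkardt-python | solve/solve.py | i4_log_10
-- ===== SOURCE A (Python) =====
-- def i4_log_10 ( i ):
--
-- #*****************************************************************************80
-- #
-- ## I4_LOG_10 returns the integer part of the logarithm base 10 of ABS(X).
-- #
-- #  Example:
-- #
-- #        I  VALUE
-- #    -----  --------
-- #        0    0
-- #        1    0
-- #        2    0
-- #        9    0
-- #       10    1
-- #       11    1
-- #       99    1
-- #      100    2
-- #      101    2
-- #      999    2
-- #     1000    3
-- #     1001    3
-- #     9999    3
-- #    10000    4
-- #
-- #  Discussion: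
-- #
-- #    I4_LOG_10 ( I ) + 1 is the number of decimal digits in I.
-- #
-- #  Licensing:
-- #
-- #    This code is distributed under the GNU LGPL license.
-- #
-- #  Modified:
-- #
-- #    08 May 2013
-- #
-- #  Author:
-- #
-- #    John Burkardt
-- #
-- #  Parameters:
-- #
-- #    Input, integer I, the number whose logarithm base 10 is desired.
-- #
-- #    Output, integer VALUE, the integer part of the logarithm base 10 of
-- #    the absolute value of X.
-- #
--   i = int ( i )
--
--   if ( i == 0 ):
--
--     value = 0
--
--   else:
--
--     value = 0
--     ten_pow = 10
--
--     i_abs = abs ( i )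
--
--     while ( ten_pow <= i_abs ):
--       value = value + 1
--       ten_pow = ten_pow * 10
--
--   return value
-- ===== SOURCE B (Python) =====
-- def i4_log_10(i):
--     i = int(i)
--     return len(str(abs(i))) - 1
-- ===== Notes on version B (the rewrite author's own statement) =====
-- stated objective: simpler
-- what changed: Replaces the multiply-by-10 counting loop with a loop-free digit count: len(str(abs(i))) - 1.
import Mathlib
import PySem

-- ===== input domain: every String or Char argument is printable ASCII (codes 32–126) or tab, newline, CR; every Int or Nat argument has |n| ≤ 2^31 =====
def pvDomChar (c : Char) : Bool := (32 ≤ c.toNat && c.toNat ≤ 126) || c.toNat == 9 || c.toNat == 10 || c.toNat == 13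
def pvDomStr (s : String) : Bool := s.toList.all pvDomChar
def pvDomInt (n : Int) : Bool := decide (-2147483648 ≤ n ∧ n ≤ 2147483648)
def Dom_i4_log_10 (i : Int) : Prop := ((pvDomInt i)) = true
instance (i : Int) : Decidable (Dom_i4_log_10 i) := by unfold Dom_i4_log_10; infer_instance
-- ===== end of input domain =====

-- B replaces A's multiply-by-10 counting loop with a loop-free digit count len(str(abs(i))) - 1 (simpler).

-- ===== PORT A =====
-- the 'while ten_pow <= i_abs' loop; the 0 < tenPow argument only justifies termination
def i4_log_10_loop (iAbs value tenPow : Int) (h : 0 < tenPow) : Int :=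
  if _h2 : tenPow ≤ iAbs then
    i4_log_10_loop iAbs (value + 1) (tenPow * 10) (by omega)
  else
    value
termination_by (iAbs + 1 - tenPow).toNat
decreasing_by omega

def i4_log_10 (i : Int) : Int :=
  if i = 0 then 0
  else i4_log_10_loop |i| 0 10 (by omega)

-- ===== PORT B =====
def i4_log_10_alt (i : Int) : Int :=
  PySem.Str.len (PySem.Int.toStr |i|) - 1

-- ===== PRECONDITION & SPEC =====
def Spec_i4_log_10 (i : Int) (out : Int) : Prop := out = i4_log_10_alt i
instance (i : Int) (out : Int) : Decidable (Spec_i4_log_10 i out) := by unfold Spec_i4_log_10; infer_instance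

-- ===== CLAIM (what is proved, stated in full; the proofs are below) =====
def Claim_equal_i4_log_10 : Prop := ∀ (i : Int), Dom_i4_log_10 i → Spec_i4_log_10 i (i4_log_10 i)

-- ===== LEMMAS AND PROOFS =====

-- length of the decimal digit string is log₁₀ + 1 (also for n = 0)
lemma toDigitsCore_length_eq_log (f : Nat) : ∀ n : Nat, n < f →
    (Nat.toDigitsCore 10 f n []).length = Nat.log 10 n + 1 := by
  induction f with
  | zero => intro n h; omega
  | succ f ih =>
    intro n hn
    rw [Nat.toDigitsCore]
    by_cases hdiv : n / 10 = 0
    · have hn10 : n < 10 := by omega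
      simp [hdiv, Nat.log_eq_zero_iff.mpr (Or.inl hn10)]
    · have h10 : 10 ≤ n := by omega
      have hlt : n / 10 < f := by omega
      simp only [hdiv, if_false]
      rw [Nat.toDigitsCore_lens_eq, ih (n / 10) hlt, Nat.log_div_base]
      have := Nat.log_pos (b := 10) (n := n) (by omega) h10
      omega

lemma toDigits_length_eq_log (n : Nat) :
    (Nat.toDigits 10 n).length = Nat.log 10 n + 1 := by
  rw [Nat.toDigits]
  exact toDigitsCore_length_eq_log (n + 1) n (by omega)

-- A's loop, started at ten_pow = 10^(k+1) with 10^k ≤ n, adds log₁₀ n - k to value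
lemma i4_log_10_loop_spec (n : Nat) (hn : n ≠ 0) :
    ∀ (m k : Nat) (v : Int) (hp : (0:Int) < 10 ^ (k + 1)),
      m = Nat.log 10 n - k → 10 ^ k ≤ n →
      i4_log_10_loop (n : Int) v ((10:Int) ^ (k + 1)) hp = v + (m : Int) := by
  intro m
  induction m with
  | zero =>
    intro k v hp hm hk
    have hlogk : Nat.log 10 n = k := by
      have := (Nat.le_log_iff_pow_le (b := 10) (by omega) (y := n) hn).mpr hk
      omega
    have hlt : n < 10 ^ (k + 1) := by
      have := Nat.lt_pow_succ_log_self (b := 10) (by omega) n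
      rwa [hlogk] at this
    rw [i4_log_10_loop]
    have : ¬ ((10:Int) ^ (k + 1) ≤ (n : Int)) := by
      exact_mod_cast not_le.mpr (by exact_mod_cast hlt)
    simp [this]
  | succ m ih =>
    intro k v hp hm hk
    have hle : 10 ^ (k + 1) ≤ n := by
      apply (Nat.le_log_iff_pow_le (b := 10) (by omega) (y := n) hn).mp
      omega
    rw [i4_log_10_loop]
    have hcond : ((10:Int) ^ (k + 1) ≤ (n : Int)) := by exact_mod_cast hle
    simp only [hcond, dif_pos]
    have hrec : i4_log_10_loop (n : Int) (v + 1) ((10:Int) ^ (k + 1) * 10) (by omega) = (v + 1) + (m : Int) :=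
      ih (k + 1) (v + 1) (by norm_num [pow_pos]) (by omega) hle
    rw [hrec]
    push_cast
    ring

-- B's port computes log₁₀ |i| (and 0 at i = 0)
lemma alt_eq_log (i : Int) : i4_log_10_alt i = (Nat.log 10 i.natAbs : Int) := by
  unfold i4_log_10_alt
  rw [PySem.Str.len_eq, PySem.Int.toList_toStr]
  rw [PySem.Int.toChars, if_neg (not_lt.mpr (abs_nonneg i))]
  rw [Int.abs_eq_natAbs, Int.toNat_natCast, toDigits_length_eq_log]
  push_cast
  ring

-- ===== VERDICT (by name: the statement is the Claim_ definition above) =====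
theorem i4_log_10_spec : Claim_equal_i4_log_10 := by
  intro i _
  unfold Spec_i4_log_10 i4_log_10
  rw [alt_eq_log]
  by_cases hi : i = 0
  · simp [hi]
  · simp only [hi, if_false]
    have hn : i.natAbs ≠ 0 := by omega
    have habs : |i| = ((i.natAbs : Nat) : Int) := Int.abs_eq_natAbs i
    rw [habs]
    rw [show i4_log_10_loop ((i.natAbs : Nat) : Int) 0 10 (by omega) =
        i4_log_10_loop ((i.natAbs : Nat) : Int) 0 ((10:Int) ^ (0 + 1)) (by norm_num) from by norm_num]
    rw [i4_log_10_loop_spec i.natAbs hn (Nat.log 10 i.natAbs) 0 0 (by norm_num)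
      (by omega) (by simpa using Nat.one_le_iff_ne_zero.mpr hn)]
    ring
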